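-- pv_equiv track=rewrite | github.com/nacho09021973/basurin | mvp/s3b_multimode_estimates.py | _mode_221_usable_reason
-- ===== SOURCE A (Python) =====
-- def _mode_221_usable_reason(mode_221_ok: bool, flags: list[str]) -> str:
--     """Determine the canonical reason for mode 221 usability.
--
--     Returns ``"ok"`` when usable; otherwise the most relevant flag or reason.
--     """
--     if mode_221_ok:
--         return "ok"
--     # Prefer the first 221-specific quality flag as the reason.
--     for flag in sorted(flags):
--         if flag.startswith("221_"):
--             return flag
--     if flags:
--         return flags[0]
--     return "mode_221_not_ok"
-- ===== SOURCE B (Python) =====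
-- def _mode_221_usable_reason(mode_221_ok: bool, flags: list[str]) -> str:
--     """Determine the canonical reason for mode 221 usability."""
--     if mode_221_ok:
--         return "ok"
--     candidates = [f for f in flags if f.startswith("221_")]
--     if candidates:
--         return min(candidates)
--     if flags:
--         return flags[0]
--     return "mode_221_not_ok"
-- ===== Notes on version B (the rewrite author's own statement) =====
-- stated objective: simpler
-- what changed: Replaced the full sort of all flags followed by a first-match scan with a single filter of the 221_-prefixed flags and a min() over that subset (the lexicographic minimum equals the first match in sorted order); fallbacks on the original list are unchanged.
import Mathlib
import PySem

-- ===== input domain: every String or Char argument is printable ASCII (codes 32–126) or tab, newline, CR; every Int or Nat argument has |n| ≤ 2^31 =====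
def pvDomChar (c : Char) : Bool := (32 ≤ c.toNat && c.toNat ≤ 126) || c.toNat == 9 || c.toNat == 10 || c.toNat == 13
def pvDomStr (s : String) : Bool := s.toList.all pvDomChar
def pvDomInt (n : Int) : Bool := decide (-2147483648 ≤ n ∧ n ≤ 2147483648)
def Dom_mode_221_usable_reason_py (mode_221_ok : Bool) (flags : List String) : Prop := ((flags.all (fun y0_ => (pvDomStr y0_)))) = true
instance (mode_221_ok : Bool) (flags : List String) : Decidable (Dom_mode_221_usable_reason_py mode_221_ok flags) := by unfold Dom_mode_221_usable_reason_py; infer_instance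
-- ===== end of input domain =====

-- B replaces A's full sort + first-match scan by filtering the "221_"-prefixed flags and taking min(); simpler, same result.

-- ===== PORT A =====
-- the 'for flag in sorted(flags): if flag.startswith("221_"): return flag' loop
def pvALoop : List String → Option String
  | [] => none
  | f :: t => if PySem.Str.startswith f "221_" then some f else pvALoop t

def mode_221_usable_reason_py (mode_221_ok : Bool) (flags : List String) : String :=
  if mode_221_ok then "ok"
  else
    match pvALoop (PySem.List.sorted flags (fun x => x) false) with
    | some f => f
    | none =>
      match flags with
      | f :: _ => f
      | [] => "mode_221_not_ok"

-- ===== PORT B =====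
def mode_221_usable_reason_py_alt (mode_221_ok : Bool) (flags : List String) : String :=
  if mode_221_ok then "ok"
  else
    let candidates := flags.filter (fun f => PySem.Str.startswith f "221_")
    match PySem.List.min? candidates (fun x => x) with
    | some m => m
    | none =>
      match flags with
      | f :: _ => f
      | [] => "mode_221_not_ok"

-- ===== PRECONDITION & SPEC =====
def Spec_mode_221_usable_reason_py (mode_221_ok : Bool) (flags : List String) (out : String) : Prop := out = mode_221_usable_reason_py_alt mode_221_ok flags
instance (mode_221_ok : Bool) (flags : List String) (out : String) : Decidable (Spec_mode_221_usable_reason_py mode_221_ok flags out) := by unfold Spec_mode_221_usable_reason_py; infer_instance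

-- ===== CLAIM (what is proved, stated in full; the proofs are below) =====
def Claim_equal_mode_221_usable_reason_py : Prop := ∀ (mode_221_ok : Bool) (flags : List String), Dom_mode_221_usable_reason_py mode_221_ok flags → Spec_mode_221_usable_reason_py mode_221_ok flags (mode_221_usable_reason_py mode_221_ok flags)

-- ===== LEMMAS AND PROOFS =====

-- A's loop is find?
theorem pvALoop_eq_find? (xs : List String) :
    pvALoop xs = xs.find? (fun f => PySem.Str.startswith f "221_") := by
  induction xs with
  | nil => rfl
  | cons f t ih => simp [pvALoop, List.find?]; split_ifs with h <;> simp [h, ih]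

-- find? is the head of the filtered list
theorem find?_eq_head_filter {α : Type} (p : α → Bool) (xs : List α) :
    xs.find? p = (xs.filter p).head? := by
  induction xs with
  | nil => rfl
  | cons x t ih =>
    by_cases h : p x = true
    · simp [List.find?, List.filter, h]
    · have h' : p x = false := by simpa using h
      rw [List.find?_cons_of_neg (by simp [h']), List.filter_cons_of_neg (by simp [h']), ih]

-- min? with identity key on a ≤-sorted list is its head
theorem min?_of_pairwise (ys : List String) (h : ys.Pairwise (· ≤ ·)) :
    PySem.List.min? ys (fun x => x) = ys.head? := by
  cases ys with
  | nil => exact (PySem.List.min?_eq_none_iff _ _).mpr rfl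
  | cons y t =>
    rw [PySem.List.min?_id_cons]
    have hle : ∀ z ∈ t, y ≤ z := (List.pairwise_cons.mp h).1
    have : t.foldl min y = y := by
      clear h
      induction t with
      | nil => rfl
      | cons z t' ih =>
        have : min y z = y := min_eq_left (hle z (by simp))
        simp [List.foldl, this]
        exact ih (fun w hw => hle w (by simp [hw]))
    simp [this]

-- min? (identity key) depends only on the multiset of elements
theorem min?_perm (xs ys : List String) (h : xs.Perm ys) :
    PySem.List.min? xs (fun x => x) = PySem.List.min? ys (fun x => x) := by
  cases hx : PySem.List.min? xs (fun x => x) with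
  | none =>
    have hxs : xs = [] := (PySem.List.min?_eq_none_iff _ _).mp hx
    subst hxs
    have hys : ys = [] := h.nil_eq.symm
    subst hys
    exact hx.symm
  | some m =>
    cases hy : PySem.List.min? ys (fun x => x) with
    | none =>
      have hys : ys = [] := (PySem.List.min?_eq_none_iff _ _).mp hy
      subst hys
      have hxs : xs = [] := h.eq_nil
      subst hxs
      have hc : PySem.List.min? ([] : List String) (fun x => x) = none :=
        (PySem.List.min?_eq_none_iff _ _).mpr rfl
      rw [hc] at hx
      cases hx
    | some m' =>
      have hm : m ∈ xs := PySem.List.min?_mem hx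
      have hm' : m' ∈ ys := PySem.List.min?_mem hy
      have h1 : m ≤ m' := PySem.List.min?_isMin hx m' (h.symm.mem_iff.mp hm')
      have h2 : m' ≤ m := PySem.List.min?_isMin hy m (h.mem_iff.mp hm)
      simp [le_antisymm h1 h2]

-- ===== VERDICT (by name: the statement is the Claim_ definition above) =====
theorem mode_221_usable_reason_py_spec : Claim_equal_mode_221_usable_reason_py := by
  intro ok flags _
  unfold Spec_mode_221_usable_reason_py mode_221_usable_reason_py mode_221_usable_reason_py_alt
  cases ok with
  | true => rfl
  | false =>
    simp only [if_neg (by simp : ¬ (false : Bool) = true)]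
    set p : String → Bool := fun f => PySem.Str.startswith f "221_" with hp
    have hperm : ((PySem.List.sorted flags (fun x => x) false).filter p).Perm (flags.filter p) :=
      (PySem.List.sorted_perm flags (fun x => x) false).filter p
    have hpw : ((PySem.List.sorted flags (fun x => x) false).filter p).Pairwise (· ≤ ·) :=
      (PySem.List.sorted_pairwise flags (fun x => x)).filter _
    rw [pvALoop_eq_find?, find?_eq_head_filter,
        ← min?_of_pairwise _ hpw, min?_perm _ _ hperm]
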